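-- pv_equiv track=rewrite | github.com/alexsh882/TPL3_python_practice_2024 | factorial.py | sumarLoop
-- ===== SOURCE A (Python) =====
-- def sumarLoop(loop, number):
--     if loop == 0 or loop == 1:
--         return 0
--     else:
--         acc = 0
--         for i in range(1, loop):
--             acc += number
--         return acc
-- ===== SOURCE B (Python) =====
-- def sumarLoop(loop, number):
--     return max(0, loop - 1) * number
-- ===== Notes on version B (the rewrite author's own statement) =====
-- stated objective: faster
-- what changed: Replaces the O(loop) accumulation loop with the closed form max(0, loop-1) * number.
import Mathlib
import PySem

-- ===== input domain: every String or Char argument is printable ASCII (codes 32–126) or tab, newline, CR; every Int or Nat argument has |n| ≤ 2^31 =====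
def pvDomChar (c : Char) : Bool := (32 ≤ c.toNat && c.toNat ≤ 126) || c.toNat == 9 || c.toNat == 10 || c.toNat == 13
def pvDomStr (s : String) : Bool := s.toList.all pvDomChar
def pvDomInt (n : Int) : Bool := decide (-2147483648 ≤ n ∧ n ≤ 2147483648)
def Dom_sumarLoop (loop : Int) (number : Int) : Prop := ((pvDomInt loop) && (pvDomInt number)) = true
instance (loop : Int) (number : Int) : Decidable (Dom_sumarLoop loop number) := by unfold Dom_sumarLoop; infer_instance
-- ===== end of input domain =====

-- B replaces A's O(loop) accumulation loop with the closed form max(0, loop-1) * number.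

-- ===== PORT A =====
def sumarLoop (loop : Int) (number : Int) : Int :=
  if loop == 0 || loop == 1 then 0
  else (PySem.List.pyRange 1 loop 1).foldl (fun acc _ => acc + number) 0

-- ===== PORT B =====
def sumarLoop_alt (loop : Int) (number : Int) : Int :=
  max 0 (loop - 1) * number

-- ===== PRECONDITION & SPEC =====
def Spec_sumarLoop (loop : Int) (number : Int) (out : Int) : Prop := out = sumarLoop_alt loop number
instance (loop : Int) (number : Int) (out : Int) : Decidable (Spec_sumarLoop loop number out) := by unfold Spec_sumarLoop; infer_instance

-- ===== CLAIM (what is proved, stated in full; the proofs are below) =====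
def Claim_equal_sumarLoop : Prop := ∀ (loop : Int) (number : Int), Dom_sumarLoop loop number → Spec_sumarLoop loop number (sumarLoop loop number)

-- ===== LEMMAS AND PROOFS =====

-- A constant-add fold over any list is length * number.
theorem foldl_const_add (l : List Int) (number acc : Int) :
    l.foldl (fun a _ => a + number) acc = acc + l.length * number := by
  induction l generalizing acc with
  | nil => simp
  | cons x xs ih => simp [List.foldl, ih]; ring

-- ===== VERDICT (by name: the statement is the Claim_ definition above) =====
theorem sumarLoop_spec : Claim_equal_sumarLoop := by
  intro loop number _
  unfold Spec_sumarLoop sumarLoop sumarLoop_alt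
  split
  · rename_i h
    simp only [Bool.or_eq_true, beq_iff_eq] at h
    rcases h with h | h <;> simp [h]
  · rename_i h
    simp only [Bool.or_eq_true, beq_iff_eq, not_or] at h
    rw [foldl_const_add, PySem.List.length_pyRange_one]
    have hmax : ((loop - 1).toNat : Int) = max 0 (loop - 1) := by omega
    rw [hmax]; ring
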